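-- pv_equiv track=rewrite | github.com/toeknay/lostfits | services/api/app/utils/fit_parser.py | count_slots
-- ===== SOURCE A (Python) =====
-- from typing import Any
--
-- def count_slots(items: list[dict[str, Any]]) -> dict[str, int]:
--     """
--     Count items by slot type based on EVE's flag system.
--
--     EVE uses 'flag' to indicate where an item is fitted:
--     - 11-18: Low slots
--     - 19-26: Mid slots
--     - 27-34: High slots
--     - 92-99: Rig slots
--     - 125-132: Subsystem slots
--     - 87, 90: Drone bay
--     - 5: Cargo hold
--
--     Args:
--         items: List of items from killmail
--
--     Returns:
--         dict with counts by slot type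
--     """
--     counts = {
--         "low_slots": 0,
--         "mid_slots": 0,
--         "high_slots": 0,
--         "rig_slots": 0,
--         "subsystem_slots": 0,
--         "drones": 0,
--         "cargo": 0,
--         "other": 0,
--     }
--
--     for item in items:
--         flag = item.get("flag")
--         if not flag:
--             continue
--
--         if 11 <= flag <= 18:
--             counts["low_slots"] += 1
--         elif 19 <= flag <= 26:
--             counts["mid_slots"] += 1
--         elif 27 <= flag <= 34:
--             counts["high_slots"] += 1
--         elif 92 <= flag <= 99:
--             counts["rig_slots"] += 1
--         elif 125 <= flag <= 132:
--             counts["subsystem_slots"] += 1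
--         elif flag in (87, 90):  # Drone bay
--             counts["drones"] += 1
--         elif flag == 5:  # Cargo
--             counts["cargo"] += 1
--         else:
--             counts["other"] += 1
--
--     return counts
-- ===== SOURCE B (Python) =====
-- from typing import Any
--
--
-- def count_slots(items: list[dict[str, Any]]) -> dict[str, int]:
--     # Staged passes: extract the truthy flags once, then count each category
--     # independently over that list; 'other' falls out by subtraction.
--     flags = [item.get("flag") for item in items]
--     flags = [f for f in flags if f]
--     low = sum(1 for f in flags if 11 <= f <= 18)
--     mid = sum(1 for f in flags if 19 <= f <= 26)
--     high = sum(1 for f in flags if 27 <= f <= 34)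
--     rig = sum(1 for f in flags if 92 <= f <= 99)
--     sub = sum(1 for f in flags if 125 <= f <= 132)
--     drones = sum(1 for f in flags if f in (87, 90))
--     cargo = sum(1 for f in flags if f == 5)
--     return {
--         "low_slots": low,
--         "mid_slots": mid,
--         "high_slots": high,
--         "rig_slots": rig,
--         "subsystem_slots": sub,
--         "drones": drones,
--         "cargo": cargo,
--         "other": len(flags) - (low + mid + high + rig + sub + drones + cargo),
--     }
-- ===== Notes on version B (the rewrite author's own statement) =====
-- stated objective: alternative
-- what changed: Instead of one pass that classifies each item with an if/elif chain and increments a mutable counts dict, B extracts the truthy flags once and then counts each of the seven concrete categories by an independent membership pass over that list, deriving 'other' by subtraction from the total.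
import Mathlib
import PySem

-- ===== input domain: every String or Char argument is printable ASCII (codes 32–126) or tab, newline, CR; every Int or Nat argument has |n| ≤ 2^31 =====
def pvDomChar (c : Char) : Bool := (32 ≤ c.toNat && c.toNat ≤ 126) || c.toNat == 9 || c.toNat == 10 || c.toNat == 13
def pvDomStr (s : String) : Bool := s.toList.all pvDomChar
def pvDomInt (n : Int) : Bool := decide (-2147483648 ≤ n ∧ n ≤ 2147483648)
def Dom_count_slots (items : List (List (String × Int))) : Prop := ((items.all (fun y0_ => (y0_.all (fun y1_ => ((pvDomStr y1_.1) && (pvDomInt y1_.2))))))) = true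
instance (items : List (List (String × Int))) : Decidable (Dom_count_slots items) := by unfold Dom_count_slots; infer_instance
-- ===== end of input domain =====

-- B replaces A's single classifying pass (if/elif chain updating a mutable counts dict) by
-- staged passes: extract the truthy flags once, count each category independently, derive
-- 'other' by subtraction; objective: alternative decomposition (same asymptotic cost).

-- ===== PORT A =====
def count_slots_init : PySem.Dict String Int :=
  PySem.Dict.ofList [("low_slots", 0), ("mid_slots", 0), ("high_slots", 0), ("rig_slots", 0),
    ("subsystem_slots", 0), ("drones", 0), ("cargo", 0), ("other", 0)]

def count_slots (items : List (List (String × Int))) : List (String × Int) :=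
  (items.foldl (fun counts item =>
    match (PySem.Dict.mk item).get? "flag" with
    | none => counts
    | some flag =>
      if flag = 0 then counts          -- 'if not flag: continue' (flag is an int here)
      else if 11 ≤ flag ∧ flag ≤ 18 then counts.modify "low_slots" 0 (· + 1)
      else if 19 ≤ flag ∧ flag ≤ 26 then counts.modify "mid_slots" 0 (· + 1)
      else if 27 ≤ flag ∧ flag ≤ 34 then counts.modify "high_slots" 0 (· + 1)
      else if 92 ≤ flag ∧ flag ≤ 99 then counts.modify "rig_slots" 0 (· + 1)
      else if 125 ≤ flag ∧ flag ≤ 132 then counts.modify "subsystem_slots" 0 (· + 1)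
      else if flag = 87 ∨ flag = 90 then counts.modify "drones" 0 (· + 1)
      else if flag = 5 then counts.modify "cargo" 0 (· + 1)
      else counts.modify "other" 0 (· + 1)) count_slots_init).items

-- ===== PORT B =====
def count_slots_alt (items : List (List (String × Int))) : List (String × Int) :=
  let flags0 : List (Option Int) := items.map (fun item => (PySem.Dict.mk item).get? "flag")
  -- '[f for f in flags if f]': drop missing flags and flag 0
  let flags : List Int := flags0.filterMap (fun o => match o with
    | none => none
    | some f => if f = 0 then none else some f)
  let low : Int := flags.countP (fun f => decide (11 ≤ f ∧ f ≤ 18))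
  let mid : Int := flags.countP (fun f => decide (19 ≤ f ∧ f ≤ 26))
  let high : Int := flags.countP (fun f => decide (27 ≤ f ∧ f ≤ 34))
  let rig : Int := flags.countP (fun f => decide (92 ≤ f ∧ f ≤ 99))
  let sub : Int := flags.countP (fun f => decide (125 ≤ f ∧ f ≤ 132))
  let drones : Int := flags.countP (fun f => f == 87 || f == 90)
  let cargo : Int := flags.countP (fun f => f == 5)
  [("low_slots", low), ("mid_slots", mid), ("high_slots", high), ("rig_slots", rig),
   ("subsystem_slots", sub), ("drones", drones), ("cargo", cargo),
   ("other", (flags.length : Int) - (low + mid + high + rig + sub + drones + cargo))]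

-- ===== PRECONDITION & SPEC =====
def Spec_count_slots (items : List (List (String × Int))) (out : List (String × Int)) : Prop := out = count_slots_alt items
instance (items : List (List (String × Int))) (out : List (String × Int)) : Decidable (Spec_count_slots items out) := by unfold Spec_count_slots; infer_instance

-- ===== CLAIM (what is proved, stated in full; the proofs are below) =====
def Claim_equal_count_slots : Prop := ∀ (items : List (List (String × Int))), Dom_count_slots items → Spec_count_slots items (count_slots items)

-- ===== LEMMAS AND PROOFS =====

-- the truthy flag of one item ('item.get("flag")' then the 'if not flag' guard)
def flagOf (item : List (String × Int)) : Option Int :=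
  match (PySem.Dict.mk item).get? "flag" with
  | none => none
  | some f => if f = 0 then none else some f

-- the classification A's if/elif chain computes, as a function of the flag
def chainCat (f : Int) : String :=
  if 11 ≤ f ∧ f ≤ 18 then "low_slots"
  else if 19 ≤ f ∧ f ≤ 26 then "mid_slots"
  else if 27 ≤ f ∧ f ≤ 34 then "high_slots"
  else if 92 ≤ f ∧ f ≤ 99 then "rig_slots"
  else if 125 ≤ f ∧ f ≤ 132 then "subsystem_slots"
  else if f = 87 ∨ f = 90 then "drones"
  else if f = 5 then "cargo"
  else "other"

def stepF (d : PySem.Dict String Int) (f : Int) : PySem.Dict String Int :=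
  d.modify (chainCat f) 0 (· + 1)

def q1 (f : Int) : Bool := decide (11 ≤ f ∧ f ≤ 18)
def q2 (f : Int) : Bool := decide (19 ≤ f ∧ f ≤ 26)
def q3 (f : Int) : Bool := decide (27 ≤ f ∧ f ≤ 34)
def q4 (f : Int) : Bool := decide (92 ≤ f ∧ f ≤ 99)
def q5 (f : Int) : Bool := decide (125 ≤ f ∧ f ≤ 132)
def q6 (f : Int) : Bool := f == 87 || f == 90
def q7 (f : Int) : Bool := f == 5
def qO (f : Int) : Bool := !(q1 f || q2 f || q3 f || q4 f || q5 f || q6 f || q7 f)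

lemma foldA_eq (items : List (List (String × Int))) : ∀ d : PySem.Dict String Int,
    items.foldl (fun counts item =>
      match (PySem.Dict.mk item).get? "flag" with
      | none => counts
      | some flag =>
        if flag = 0 then counts
        else if 11 ≤ flag ∧ flag ≤ 18 then counts.modify "low_slots" 0 (· + 1)
        else if 19 ≤ flag ∧ flag ≤ 26 then counts.modify "mid_slots" 0 (· + 1)
        else if 27 ≤ flag ∧ flag ≤ 34 then counts.modify "high_slots" 0 (· + 1)
        else if 92 ≤ flag ∧ flag ≤ 99 then counts.modify "rig_slots" 0 (· + 1)
        else if 125 ≤ flag ∧ flag ≤ 132 then counts.modify "subsystem_slots" 0 (· + 1)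
        else if flag = 87 ∨ flag = 90 then counts.modify "drones" 0 (· + 1)
        else if flag = 5 then counts.modify "cargo" 0 (· + 1)
        else counts.modify "other" 0 (· + 1)) d
    = (items.filterMap flagOf).foldl stepF d := by
  induction items with
  | nil => intro d; rfl
  | cons it its ih =>
    intro d
    rw [List.foldl_cons, List.filterMap_cons]
    cases h : (PySem.Dict.mk it).get? "flag" with
    | none =>
      have hf : flagOf it = none := by unfold flagOf; rw [h]
      rw [hf]
      simp only [h]
      exact ih d
    | some f =>
      by_cases h0 : f = 0
      · have hf : flagOf it = none := by unfold flagOf; rw [h]; simp [h0]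
        rw [hf]
        simp only [h, h0]
        exact ih d
      · have hf : flagOf it = some f := by unfold flagOf; rw [h]; simp [h0]
        rw [hf, List.foldl_cons]
        simp only [h]
        rw [if_neg h0]
        have hstep : (if 11 ≤ f ∧ f ≤ 18 then d.modify "low_slots" 0 (· + 1)
          else if 19 ≤ f ∧ f ≤ 26 then d.modify "mid_slots" 0 (· + 1)
          else if 27 ≤ f ∧ f ≤ 34 then d.modify "high_slots" 0 (· + 1)
          else if 92 ≤ f ∧ f ≤ 99 then d.modify "rig_slots" 0 (· + 1)
          else if 125 ≤ f ∧ f ≤ 132 then d.modify "subsystem_slots" 0 (· + 1)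
          else if f = 87 ∨ f = 90 then d.modify "drones" 0 (· + 1)
          else if f = 5 then d.modify "cargo" 0 (· + 1)
          else d.modify "other" 0 (· + 1)) = stepF d f := by
          unfold stepF chainCat
          split_ifs <;> rfl
        rw [hstep]
        exact ih (stepF d f)

lemma fold_items (flags : List Int) : ∀ a b c d e u v w : Int,
    ((flags.foldl stepF (PySem.Dict.mk [("low_slots", a), ("mid_slots", b), ("high_slots", c), ("rig_slots", d), ("subsystem_slots", e), ("drones", u), ("cargo", v), ("other", w)])).items)
    = [("low_slots", a + (flags.countP q1 : Int)), ("mid_slots", b + (flags.countP q2 : Int)),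
       ("high_slots", c + (flags.countP q3 : Int)), ("rig_slots", d + (flags.countP q4 : Int)),
       ("subsystem_slots", e + (flags.countP q5 : Int)), ("drones", u + (flags.countP q6 : Int)),
       ("cargo", v + (flags.countP q7 : Int)), ("other", w + (flags.countP qO : Int))] := by
  induction flags with
  | nil => intro a b c d e u v w; simp
  | cons f fs ih =>
    intro a b c d e u v w
    rw [List.foldl_cons]
    by_cases h1 : 11 ≤ f ∧ f ≤ 18
    · have hs : stepF (PySem.Dict.mk [("low_slots", a), ("mid_slots", b), ("high_slots", c), ("rig_slots", d), ("subsystem_slots", e), ("drones", u), ("cargo", v), ("other", w)]) f = PySem.Dict.mk [("low_slots", a + 1), ("mid_slots", b), ("high_slots", c), ("rig_slots", d), ("subsystem_slots", e), ("drones", u), ("cargo", v), ("other", w)] := by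
        unfold stepF chainCat; rw [if_pos h1]; rfl
      rw [hs, ih]
      simp only [List.countP_cons, List.cons.injEq, Prod.mk.injEq, q1, q2, q3, q4, q5, q6, q7, qO, Bool.or_eq_true, Bool.or_eq_false_iff, Bool.not_eq_true', decide_eq_true_eq, decide_eq_false_iff_not, beq_iff_eq, beq_eq_false_iff_ne, true_and, and_true]
      split_ifs <;> omega
    by_cases h2 : 19 ≤ f ∧ f ≤ 26
    · have hs : stepF (PySem.Dict.mk [("low_slots", a), ("mid_slots", b), ("high_slots", c), ("rig_slots", d), ("subsystem_slots", e), ("drones", u), ("cargo", v), ("other", w)]) f = PySem.Dict.mk [("low_slots", a), ("mid_slots", b + 1), ("high_slots", c), ("rig_slots", d), ("subsystem_slots", e), ("drones", u), ("cargo", v), ("other", w)] := by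
        unfold stepF chainCat; rw [if_neg h1]; rw [if_pos h2]; rfl
      rw [hs, ih]
      simp only [List.countP_cons, List.cons.injEq, Prod.mk.injEq, q1, q2, q3, q4, q5, q6, q7, qO, Bool.or_eq_true, Bool.or_eq_false_iff, Bool.not_eq_true', decide_eq_true_eq, decide_eq_false_iff_not, beq_iff_eq, beq_eq_false_iff_ne, true_and, and_true]
      split_ifs <;> omega
    by_cases h3 : 27 ≤ f ∧ f ≤ 34
    · have hs : stepF (PySem.Dict.mk [("low_slots", a), ("mid_slots", b), ("high_slots", c), ("rig_slots", d), ("subsystem_slots", e), ("drones", u), ("cargo", v), ("other", w)]) f = PySem.Dict.mk [("low_slots", a), ("mid_slots", b), ("high_slots", c + 1), ("rig_slots", d), ("subsystem_slots", e), ("drones", u), ("cargo", v), ("other", w)] := by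
        unfold stepF chainCat; rw [if_neg h1]; rw [if_neg h2]; rw [if_pos h3]; rfl
      rw [hs, ih]
      simp only [List.countP_cons, List.cons.injEq, Prod.mk.injEq, q1, q2, q3, q4, q5, q6, q7, qO, Bool.or_eq_true, Bool.or_eq_false_iff, Bool.not_eq_true', decide_eq_true_eq, decide_eq_false_iff_not, beq_iff_eq, beq_eq_false_iff_ne, true_and, and_true]
      split_ifs <;> omega
    by_cases h4 : 92 ≤ f ∧ f ≤ 99
    · have hs : stepF (PySem.Dict.mk [("low_slots", a), ("mid_slots", b), ("high_slots", c), ("rig_slots", d), ("subsystem_slots", e), ("drones", u), ("cargo", v), ("other", w)]) f = PySem.Dict.mk [("low_slots", a), ("mid_slots", b), ("high_slots", c), ("rig_slots", d + 1), ("subsystem_slots", e), ("drones", u), ("cargo", v), ("other", w)] := by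
        unfold stepF chainCat; rw [if_neg h1]; rw [if_neg h2]; rw [if_neg h3]; rw [if_pos h4]; rfl
      rw [hs, ih]
      simp only [List.countP_cons, List.cons.injEq, Prod.mk.injEq, q1, q2, q3, q4, q5, q6, q7, qO, Bool.or_eq_true, Bool.or_eq_false_iff, Bool.not_eq_true', decide_eq_true_eq, decide_eq_false_iff_not, beq_iff_eq, beq_eq_false_iff_ne, true_and, and_true]
      split_ifs <;> omega
    by_cases h5 : 125 ≤ f ∧ f ≤ 132
    · have hs : stepF (PySem.Dict.mk [("low_slots", a), ("mid_slots", b), ("high_slots", c), ("rig_slots", d), ("subsystem_slots", e), ("drones", u), ("cargo", v), ("other", w)]) f = PySem.Dict.mk [("low_slots", a), ("mid_slots", b), ("high_slots", c), ("rig_slots", d), ("subsystem_slots", e + 1), ("drones", u), ("cargo", v), ("other", w)] := by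
        unfold stepF chainCat; rw [if_neg h1]; rw [if_neg h2]; rw [if_neg h3]; rw [if_neg h4]; rw [if_pos h5]; rfl
      rw [hs, ih]
      simp only [List.countP_cons, List.cons.injEq, Prod.mk.injEq, q1, q2, q3, q4, q5, q6, q7, qO, Bool.or_eq_true, Bool.or_eq_false_iff, Bool.not_eq_true', decide_eq_true_eq, decide_eq_false_iff_not, beq_iff_eq, beq_eq_false_iff_ne, true_and, and_true]
      split_ifs <;> omega
    by_cases h6 : f = 87 ∨ f = 90
    · have hs : stepF (PySem.Dict.mk [("low_slots", a), ("mid_slots", b), ("high_slots", c), ("rig_slots", d), ("subsystem_slots", e), ("drones", u), ("cargo", v), ("other", w)]) f = PySem.Dict.mk [("low_slots", a), ("mid_slots", b), ("high_slots", c), ("rig_slots", d), ("subsystem_slots", e), ("drones", u + 1), ("cargo", v), ("other", w)] := by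
        unfold stepF chainCat; rw [if_neg h1]; rw [if_neg h2]; rw [if_neg h3]; rw [if_neg h4]; rw [if_neg h5]; rw [if_pos h6]; rfl
      rw [hs, ih]
      simp only [List.countP_cons, List.cons.injEq, Prod.mk.injEq, q1, q2, q3, q4, q5, q6, q7, qO, Bool.or_eq_true, Bool.or_eq_false_iff, Bool.not_eq_true', decide_eq_true_eq, decide_eq_false_iff_not, beq_iff_eq, beq_eq_false_iff_ne, true_and, and_true]
      split_ifs <;> omega
    by_cases h7 : f = 5
    · have hs : stepF (PySem.Dict.mk [("low_slots", a), ("mid_slots", b), ("high_slots", c), ("rig_slots", d), ("subsystem_slots", e), ("drones", u), ("cargo", v), ("other", w)]) f = PySem.Dict.mk [("low_slots", a), ("mid_slots", b), ("high_slots", c), ("rig_slots", d), ("subsystem_slots", e), ("drones", u), ("cargo", v + 1), ("other", w)] := by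
        unfold stepF chainCat; rw [if_neg h1]; rw [if_neg h2]; rw [if_neg h3]; rw [if_neg h4]; rw [if_neg h5]; rw [if_neg h6]; rw [if_pos h7]; rfl
      rw [hs, ih]
      simp only [List.countP_cons, List.cons.injEq, Prod.mk.injEq, q1, q2, q3, q4, q5, q6, q7, qO, Bool.or_eq_true, Bool.or_eq_false_iff, Bool.not_eq_true', decide_eq_true_eq, decide_eq_false_iff_not, beq_iff_eq, beq_eq_false_iff_ne, true_and, and_true]
      split_ifs <;> omega
    have hs : stepF (PySem.Dict.mk [("low_slots", a), ("mid_slots", b), ("high_slots", c), ("rig_slots", d), ("subsystem_slots", e), ("drones", u), ("cargo", v), ("other", w)]) f = PySem.Dict.mk [("low_slots", a), ("mid_slots", b), ("high_slots", c), ("rig_slots", d), ("subsystem_slots", e), ("drones", u), ("cargo", v), ("other", w + 1)] := by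
      unfold stepF chainCat; rw [if_neg h1]; rw [if_neg h2]; rw [if_neg h3]; rw [if_neg h4]; rw [if_neg h5]; rw [if_neg h6]; rw [if_neg h7]; rfl
    rw [hs, ih]
    simp only [List.countP_cons, List.cons.injEq, Prod.mk.injEq, q1, q2, q3, q4, q5, q6, q7, qO, Bool.or_eq_true, Bool.or_eq_false_iff, Bool.not_eq_true', decide_eq_true_eq, decide_eq_false_iff_not, beq_iff_eq, beq_eq_false_iff_ne, true_and, and_true]
    split_ifs <;> omega

set_option maxHeartbeats 2000000 in
lemma count_partition (L : List Int) :
    L.countP q1 + L.countP q2 + L.countP q3 + L.countP q4 + L.countP q5 + L.countP q6 + L.countP q7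
      + L.countP qO = L.length := by
  induction L with
  | nil => rfl
  | cons f fs ih =>
    simp only [List.countP_cons, List.length_cons]
    simp only [q1, q2, q3, q4, q5, q6, q7, qO, Bool.or_eq_true, Bool.not_eq_true',
      Bool.or_eq_false_iff, decide_eq_true_eq, decide_eq_false_iff_not, beq_iff_eq,
      beq_eq_false_iff_ne]
    split_ifs <;> omega

lemma countP_qO_eq (L : List Int) :
    (L.countP qO : Int) = (L.length : Int)
      - ((L.countP q1 : Int) + (L.countP q2 : Int) + (L.countP q3 : Int) + (L.countP q4 : Int)
        + (L.countP q5 : Int) + (L.countP q6 : Int) + (L.countP q7 : Int)) := by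
  have := count_partition L
  omega

-- ===== VERDICT (by name: the statement is the Claim_ definition above) =====
theorem count_slots_spec : Claim_equal_count_slots := by
  intro items _
  unfold Spec_count_slots count_slots count_slots_alt
  rw [foldA_eq]
  have hinit : count_slots_init = PySem.Dict.mk [("low_slots", 0), ("mid_slots", 0),
      ("high_slots", 0), ("rig_slots", 0), ("subsystem_slots", 0), ("drones", 0),
      ("cargo", 0), ("other", 0)] := rfl
  rw [hinit, fold_items]
  have hflags : (items.map (fun item => (PySem.Dict.mk item).get? "flag")).filterMap
      (fun o => match o with | none => none | some f => if f = 0 then none else some f)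
      = items.filterMap flagOf := by
    rw [List.filterMap_map]; rfl
  simp only [hflags, zero_add, countP_qO_eq]
  rfl
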